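-- pv_equiv track=rewrite | github.com/IHateChem/Algo_practice | 백준/Silver/1436. 영화감독 숌/영화감독 숌.py | getsixnum
-- ===== SOURCE A (Python) =====
-- def getsixnum(n):
--     cnt = 0
--     while n:
--         if n % 10 == 6:
--             cnt += 1
--         else:
--             cnt = 0
--         n = n // 10
--         if cnt == 3:
--             return True
--     return False
-- ===== SOURCE B (Python) =====
-- def getsixnum(n):
--     return '666' in str(n)
-- ===== Notes on version B (the rewrite author's own statement) =====
-- stated objective: idiomatic
-- what changed: Replaced the digit-by-digit modular scan with a consecutive-six counter by a substring test: '666' in str(n); Pre_ excludes negative n, on which A's while loop never terminates (floor division stalls at minus one) while B returns immediately.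
import Mathlib
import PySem

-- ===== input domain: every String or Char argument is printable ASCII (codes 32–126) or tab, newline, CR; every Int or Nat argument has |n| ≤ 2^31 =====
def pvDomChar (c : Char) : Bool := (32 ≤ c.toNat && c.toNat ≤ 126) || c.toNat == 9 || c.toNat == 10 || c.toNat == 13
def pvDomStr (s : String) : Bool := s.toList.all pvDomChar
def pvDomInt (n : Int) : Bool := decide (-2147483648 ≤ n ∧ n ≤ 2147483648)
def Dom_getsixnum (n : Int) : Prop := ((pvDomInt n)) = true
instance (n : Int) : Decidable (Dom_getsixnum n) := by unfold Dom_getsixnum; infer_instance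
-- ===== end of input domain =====

-- B replaces A's modular digit scan with a counter by the idiomatic substring test '666' in str(n).

-- ===== PORT A =====
-- A's while-loop over n (n % 10 test, cnt counter, n //= 10), as structural
-- recursion on the Nat value of n; A only terminates for n ≥ 0 (see Pre_).
def getsixnumLoop (n cnt : Nat) : Bool :=
  if h : n = 0 then false
  else
    let cnt' := if n % 10 = 6 then cnt + 1 else 0
    if cnt' = 3 then true else getsixnumLoop (n / 10) cnt'
termination_by n
decreasing_by exact Nat.div_lt_self (Nat.pos_of_ne_zero h) (by norm_num)

def getsixnum (n : Int) : Bool := getsixnumLoop n.toNat 0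

-- ===== PORT B =====
def getsixnum_alt (n : Int) : Bool := PySem.Str.isIn "666" (PySem.Int.toStr n)

-- ===== PRECONDITION & SPEC =====
-- A's while-loop never terminates for n < 0 (n // 10 stalls at -1), so only n ≥ 0 is admitted.
def Pre_getsixnum (n : Int) : Prop := 0 ≤ n
instance (n : Int) : Decidable (Pre_getsixnum n) := by unfold Pre_getsixnum; infer_instance
def pvWitness_getsixnum : Int := (36664)

def Spec_getsixnum (n : Int) (out : Bool) : Prop := out = getsixnum_alt n
instance (n : Int) (out : Bool) : Decidable (Spec_getsixnum n out) := by unfold Spec_getsixnum; infer_instance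

-- ===== CLAIM (what is proved, stated in full; the proofs are below) =====
def Claim_equal_getsixnum : Prop := ∀ (n : Int), Dom_getsixnum n → Pre_getsixnum n → Spec_getsixnum n (getsixnum n)

-- ===== LEMMAS AND PROOFS =====

-- digits of m, least significant first ([] for m = 0)
def rdigs (m : Nat) : List Char :=
  if h : m = 0 then [] else Nat.digitChar (m % 10) :: rdigs (m / 10)
termination_by m
decreasing_by exact Nat.div_lt_self (Nat.pos_of_ne_zero h) (by norm_num)

-- three consecutive '6' characters anywhere in the list
def has666 : List Char → Bool
  | c1 :: c2 :: c3 :: rest =>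
      if c1 = '6' ∧ c2 = '6' ∧ c3 = '6' then true else has666 (c2 :: c3 :: rest)
  | _ => false

theorem has666_iff_infix (cs : List Char) : has666 cs = true ↔ ['6', '6', '6'] <:+: cs := by
  induction cs with
  | nil => simp [has666]
  | cons a t ih =>
    match t, ih with
    | [], _ =>
      constructor
      · intro h; exact absurd h (by simp [has666])
      · intro h; have := h.length_le; simp at this
    | [b], _ =>
      constructor
      · intro h; exact absurd h (by simp [has666])
      · intro h; have := h.length_le; simp at this
    | b :: c :: r, ih =>
      simp only [has666, List.infix_cons_iff (l₂ := b :: c :: r)]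
      by_cases h6 : a = '6' ∧ b = '6' ∧ c = '6'
      · obtain ⟨h1, h2, h3⟩ := h6
        subst h1; subst h2; subst h3
        simp [List.prefix_cons_iff]
      · rw [if_neg h6]
        rw [ih]
        constructor
        · intro h; exact Or.inr h
        · rintro (h | h)
          · exfalso
            rcases h with ⟨s, hs⟩
            cases hs
            exact h6 ⟨rfl, rfl, rfl⟩
          · exact h

theorem has666_cons_of_ne (d : Char) (hd : d ≠ '6') (xs : List Char) :
    has666 (d :: xs) = has666 xs := by
  match xs with
  | [] => simp [has666]
  | [a] => simp [has666]
  | a :: b :: r =>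
    simp only [has666]
    rw [if_neg (fun h => hd h.1)]

theorem has666_six_cons_of_ne (x : Char) (hx : x ≠ '6') (xs : List Char) :
    has666 ('6' :: x :: xs) = has666 xs := by
  match xs with
  | [] => simp [has666]
  | b :: r =>
    simp only [has666]
    rw [if_neg (fun h => hx h.2.1)]
    exact has666_cons_of_ne x hx (b :: r)

theorem has666_six_six_cons_of_ne (x : Char) (hx : x ≠ '6') (xs : List Char) :
    has666 ('6' :: '6' :: x :: xs) = has666 xs := by
  simp only [has666]
  rw [if_neg (fun h => hx h.2.2)]
  exact has666_six_cons_of_ne x hx xs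

-- A's counter loop over a character list
def scan6 : Nat → List Char → Bool
  | _, [] => false
  | c, x :: xs => if x = '6' then (if c + 1 = 3 then true else scan6 (c + 1) xs) else scan6 0 xs

theorem scan6_eq_has666 (cs : List Char) : ∀ c, c < 3 →
    scan6 c cs = has666 (List.replicate c '6' ++ cs) := by
  induction cs with
  | nil => intro c hc; interval_cases c <;> simp [scan6, has666]
  | cons x xs ih =>
    intro c hc
    by_cases hx : x = '6'
    · subst hx
      interval_cases c
      · rw [show List.replicate 0 '6' ++ '6' :: xs = List.replicate 1 '6' ++ xs from rfl]
        simpa [scan6] using ih 1 (by norm_num)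
      · rw [show List.replicate 1 '6' ++ '6' :: xs = List.replicate 2 '6' ++ xs from rfl]
        simpa [scan6] using ih 2 (by norm_num)
      · simp [scan6, has666]
    · have hrep : ∀ c' < 3, has666 (List.replicate c' '6' ++ x :: xs) = has666 xs := by
        intro c' hc'
        interval_cases c'
        · exact has666_cons_of_ne x hx xs
        · exact has666_six_cons_of_ne x hx xs
        · exact has666_six_six_cons_of_ne x hx xs
      rw [hrep c hc]
      simp only [scan6, if_neg hx]
      simpa using ih 0 (by norm_num)

theorem digitChar_eq_six_iff (d : Nat) (h : d < 10) : Nat.digitChar d = '6' ↔ d = 6 := by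
  interval_cases d <;> decide

theorem getsixnumLoop_eq_scan6 (m : Nat) : ∀ c, getsixnumLoop m c = scan6 c (rdigs m) := by
  induction m using Nat.strong_induction_on with
  | _ m ih =>
    intro c
    by_cases h : m = 0
    · subst h; simp [getsixnumLoop, rdigs, scan6]
    · rw [getsixnumLoop, rdigs, dif_neg h, dif_neg h]
      have hlt : m / 10 < m := Nat.div_lt_self (Nat.pos_of_ne_zero h) (by norm_num)
      have hd := digitChar_eq_six_iff (m % 10) (Nat.mod_lt m (by norm_num))
      by_cases h6 : m % 10 = 6
      · simp only [scan6, if_pos (hd.mpr h6), if_pos h6]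
        by_cases h3 : c + 1 = 3
        · simp [h3]
        · simp only [if_neg h3]
          exact ih _ hlt _
      · simp only [scan6, if_neg (fun hc => h6 (hd.mp hc)), if_neg h6]
        have : (0 : Nat) ≠ 3 := by norm_num
        rw [if_neg this]
        exact ih _ hlt 0

-- accumulator lemma for Nat.toDigitsCore
theorem toDigitsCore_acc (b : Nat) : ∀ (f n : Nat) (ds : List Char),
    Nat.toDigitsCore b f n ds = Nat.toDigitsCore b f n [] ++ ds := by
  intro f
  induction f with
  | zero => intro n ds; simp [Nat.toDigitsCore]
  | succ f ih =>
    intro n ds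
    simp only [Nat.toDigitsCore]
    by_cases h : n / b = 0
    · simp [h]
    · rw [if_neg h, if_neg h, ih (n / b) ((n % b).digitChar :: ds),
        ih (n / b) [(n % b).digitChar]]
      simp

theorem toDigitsCore_eq_rdigs : ∀ (f m : Nat), 0 < m → m < f →
    Nat.toDigitsCore 10 f m [] = (rdigs m).reverse := by
  intro f
  induction f with
  | zero => intro m _ h; omega
  | succ f ih =>
    intro m hm hmf
    simp only [Nat.toDigitsCore]
    rw [rdigs, dif_neg (Nat.pos_iff_ne_zero.mp hm)]
    by_cases h : m / 10 = 0
    · rw [if_pos h, h, rdigs]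
      simp
    · rw [if_neg h, toDigitsCore_acc,
        ih (m / 10) (Nat.pos_of_ne_zero h)
          (by have := Nat.div_lt_self hm (show (1:Nat) < 10 by norm_num); omega)]
      simp

theorem toDigits_eq_rdigs (m : Nat) (hm : 0 < m) :
    Nat.toDigits 10 m = (rdigs m).reverse :=
  toDigitsCore_eq_rdigs (m + 1) m hm (by omega)

theorem infix666_reverse (cs : List Char) :
    (['6', '6', '6'] <:+: cs.reverse) ↔ (['6', '6', '6'] <:+: cs) := by
  rw [show (['6', '6', '6'] : List Char) = (['6', '6', '6'] : List Char).reverse from rfl,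
    List.reverse_infix]
  rfl

-- ===== VERDICT (by name: the statement is the Claim_ definition above) =====
theorem getsixnum_spec : Claim_equal_getsixnum := by
  intro n _ hpre
  unfold Spec_getsixnum getsixnum getsixnum_alt
  rw [PySem.Str.isIn_eq, PySem.Int.toList_toStr]
  have hnn : ¬ n < 0 := not_lt.mpr hpre
  show getsixnumLoop n.toNat 0 = PySem.Chars.isIn "666".toList (PySem.Int.toChars n)
  rw [PySem.Int.toChars, if_neg hnn]
  set m := n.toNat with hm
  by_cases h0 : m = 0
  · rw [h0, getsixnumLoop]; decide
  · rw [toDigits_eq_rdigs m (Nat.pos_of_ne_zero h0),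
      getsixnumLoop_eq_scan6 m 0, scan6_eq_has666 (rdigs m) 0 (by norm_num)]
    simp only [List.replicate, List.nil_append]
    rw [show ("666".toList : List Char) = ['6', '6', '6'] from rfl]
    apply Bool.eq_iff_iff.mpr
    rw [has666_iff_infix, PySem.Chars.isIn_iff_infix, infix666_reverse]
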